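-- pv_equiv track=rewrite | github.com/MostafaH04/ICS4U0 | recursion/main.py | recursiveMirrordromes
-- ===== SOURCE A (Python) =====
-- def isMirrordrome(text):
--     single = ['i', 'l', 'm', 'n', 'o', 't', 'u', 'v', 'w', 'x']
--     double = {'b':'d', 'p':'q', 's':'z'}
--     if len(text) == 1:
--         if text not in single:
--             return False
--     else:
--         for i in range(len(text)//2):
--             if text[i] in single:
--                 if text[i] != text[-1-i]:
--                     return False
--             else:
--                 if text[i] in double.keys():
--                     if text[-1-i] != double[text[i]]:
--                         return False
--                 elif text[-1-i] in double.keys():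
--                     if text[i] != double[text[-1-i]]:
--                         return False
--                 else:
--                     return False
--     return True
--
-- def recursiveMirrordromes(text):
--     total = 0
--     if len(text) < 1:
--         return 0
--     if isMirrordrome(text):
--         total += 1
--     total += recursiveMirrordromes(text[1:]) + recursiveMirrordromes(text[:-1]) - recursiveMirrordromes(text[1:-1])
--     return total
-- ===== SOURCE B (Python) =====
-- MIRROR = {'i': 'i', 'l': 'l', 'm': 'm', 'n': 'n', 'o': 'o', 't': 't',
--           'u': 'u', 'v': 'v', 'w': 'w', 'x': 'x',
--           'b': 'd', 'd': 'b', 'p': 'q', 'q': 'p', 's': 'z', 'z': 's'}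
--
-- def _isMir(sub):
--     n = len(sub)
--     if n == 1:
--         return MIRROR.get(sub) == sub
--     return all(MIRROR.get(sub[i]) == sub[n - 1 - i] for i in range(n // 2))
--
-- def recursiveMirrordromes(text):
--     n = len(text)
--     return sum(1 for i in range(n) for j in range(i + 1, n + 1) if _isMir(text[i:j]))
-- ===== Notes on version B (the rewrite author's own statement) =====
-- stated objective: faster
-- what changed: replaces A's exponential inclusion-exclusion recursion and its three-way single/double branch checker by an iterative enumeration of all O(n^2) contiguous substrings, each tested with a single precomputed mirror-map lookup per character pair
import Mathlib
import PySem

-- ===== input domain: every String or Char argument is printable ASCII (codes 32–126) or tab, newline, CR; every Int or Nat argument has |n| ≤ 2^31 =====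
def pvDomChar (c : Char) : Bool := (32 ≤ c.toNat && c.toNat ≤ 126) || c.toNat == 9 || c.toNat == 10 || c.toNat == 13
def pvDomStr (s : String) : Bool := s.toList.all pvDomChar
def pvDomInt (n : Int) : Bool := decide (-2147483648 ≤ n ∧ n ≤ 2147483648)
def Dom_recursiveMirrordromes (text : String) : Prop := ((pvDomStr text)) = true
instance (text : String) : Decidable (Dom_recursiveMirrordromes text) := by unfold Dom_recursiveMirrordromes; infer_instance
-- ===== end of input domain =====

-- B replaces A's exponential inclusion-exclusion recursion and its single/double three-branch
-- checker by iterating over all contiguous substrings and testing each pair of characters with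
-- one precomputed mirror-map lookup: asymptotically faster, same return value.

-- ===== PORT A =====
-- module helper isMirrordrome as A writes it (single list + double dict)
def pvSingle : List Char := ['i', 'l', 'm', 'n', 'o', 't', 'u', 'v', 'w', 'x']
def pvDouble : PySem.Dict Char Char := PySem.Dict.ofList [('b', 'd'), ('p', 'q'), ('s', 'z')]

-- the 'for i in range(len(text)//2)' loop with its early 'return False's
-- (indices are always in range here, so xs[i] is ported as pyGetD; double[…] is guarded by 'in double.keys()')
def pvMirLoop (s : List Char) : List Int → Bool
  | [] => true
  | i :: rest =>
    if pvSingle.contains (PySem.List.pyGetD s i ' ') then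
      if PySem.List.pyGetD s i ' ' ≠ PySem.List.pyGetD s (-1 - i) ' ' then false
      else pvMirLoop s rest
    else if pvDouble.contains (PySem.List.pyGetD s i ' ') then
      if PySem.List.pyGetD s (-1 - i) ' ' ≠ pvDouble.getD (PySem.List.pyGetD s i ' ') ' ' then false
      else pvMirLoop s rest
    else if pvDouble.contains (PySem.List.pyGetD s (-1 - i) ' ') then
      if PySem.List.pyGetD s i ' ' ≠ pvDouble.getD (PySem.List.pyGetD s (-1 - i) ' ') ' ' then false
      else pvMirLoop s rest
    else false

-- 'text not in single' for the length-1 string is ported as the membership of its character (exact)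
def pvIsMirrordrome (s : List Char) : Bool :=
  if s.length == 1 then pvSingle.contains (PySem.List.pyGetD s 0 ' ')
  else pvMirLoop s (PySem.List.pyRange 0 (PySem.Int.floordiv (s.length : Int) 2) 1)

-- the recursion, on fuel = |text| (each recursive call shortens the string by at least one,
-- so fuel ≥ |s| always holds and the fuel-0 branch coincides with the 'len < 1' branch: exact)
def recursiveMirrordromesFuel : Nat → List Char → Int
  | 0, _ => 0
  | n + 1, s =>
    if (s.length : Int) < 1 then 0
    else
      (if pvIsMirrordrome s then 1 else 0)
        + recursiveMirrordromesFuel n (PySem.List.slice s (some 1) none)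
        + recursiveMirrordromesFuel n (PySem.List.slice s none (some (-1)))
        - recursiveMirrordromesFuel n (PySem.List.slice s (some 1) (some (-1)))

def recursiveMirrordromesList (s : List Char) : Int := recursiveMirrordromesFuel s.length s

def recursiveMirrordromes (text : String) : Int := recursiveMirrordromesList text.toList

-- ===== PORT B =====
-- B's module constant MIRROR: every character paired with its mirror image
def pvMirror : PySem.Dict Char Char :=
  PySem.Dict.ofList [('i', 'i'), ('l', 'l'), ('m', 'm'), ('n', 'n'), ('o', 'o'), ('t', 't'),
                     ('u', 'u'), ('v', 'v'), ('w', 'w'), ('x', 'x'),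
                     ('b', 'd'), ('d', 'b'), ('p', 'q'), ('q', 'p'), ('s', 'z'), ('z', 's')]

-- B's helper _isMir: 'MIRROR.get(sub[i]) == sub[n-1-i]' — a None lookup never equals a character
def pvIsMirAlt (s : List Char) : Bool :=
  if s.length == 1 then
    pvMirror.get? (PySem.List.pyGetD s 0 ' ') == some (PySem.List.pyGetD s 0 ' ')
  else
    (PySem.List.pyRange 0 (PySem.Int.floordiv (s.length : Int) 2) 1).all fun i =>
      pvMirror.get? (PySem.List.pyGetD s i ' ')
        == some (PySem.List.pyGetD s ((s.length : Int) - 1 - i) ' ')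

-- 'sum(1 for i in range(n) for j in range(i+1, n+1) if _isMir(text[i:j]))'
def recursiveMirrordromesAltList (s : List Char) : Int :=
  ((PySem.List.pyRange 0 (s.length : Int) 1).map (fun i =>
      (((PySem.List.pyRange (i + 1) ((s.length : Int) + 1) 1).countP
          (fun j => pvIsMirAlt (PySem.List.slice s (some i) (some j)))) : Int))).sum

def recursiveMirrordromes_alt (text : String) : Int := recursiveMirrordromesAltList text.toList

-- ===== PRECONDITION & SPEC =====
def Spec_recursiveMirrordromes (text : String) (out : Int) : Prop := out = recursiveMirrordromes_alt text
instance (text : String) (out : Int) : Decidable (Spec_recursiveMirrordromes text out) := by unfold Spec_recursiveMirrordromes; infer_instance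

-- ===== CLAIM (what is proved, stated in full; the proofs are below) =====
def Claim_equal_recursiveMirrordromes : Prop := ∀ (text : String), Dom_recursiveMirrordromes text → Spec_recursiveMirrordromes text (recursiveMirrordromes text)

-- ===== LEMMAS AND PROOFS =====

-- the values of the slices text[1:] and text[1:-1]
theorem pv_slice_tail (s : List Char) : PySem.List.slice s (some 1) none = s.tail := by
  have h := PySem.List.slice_from (xs := s) (a := 1) (by norm_num)
  simpa [List.drop_one] using h

theorem pv_slice_mid (s : List Char) :
    PySem.List.slice s (some 1) (some (-1)) = s.tail.dropLast := by
  cases s with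
  | nil => rfl
  | cons a t =>
    simp [PySem.List.slice, PySem.List.clampIdx, List.dropLast_eq_take]
    split_ifs <;> omega

-- literal items of the two dicts, for unfolding lookups
theorem pvMirror_mk : pvMirror = PySem.Dict.mk
    [('i', 'i'), ('l', 'l'), ('m', 'm'), ('n', 'n'), ('o', 'o'), ('t', 't'),
     ('u', 'u'), ('v', 'v'), ('w', 'w'), ('x', 'x'),
     ('b', 'd'), ('d', 'b'), ('p', 'q'), ('q', 'p'), ('s', 'z'), ('z', 's')] := by decide

theorem pvDouble_mk : pvDouble = PySem.Dict.mk [('b', 'd'), ('p', 'q'), ('s', 'z')] := by decide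

-- the generic single-character case of the pair lemma
theorem pvCaseSingle (a b : Char) (hg : pvMirror.get? a = some a)
    (h1 : pvSingle.contains a = true) :
    (pvMirror.get? a == some b)
      = (if pvSingle.contains a then !(decide (a ≠ b))
         else if pvDouble.contains a then !(decide (b ≠ pvDouble.getD a ' '))
         else if pvDouble.contains b then !(decide (a ≠ pvDouble.getD b ' '))
         else false) := by
  rw [hg, if_pos h1]
  by_cases hb : a = b
  · subst hb; simp
  · simp [hb]

-- the generic left-double case of the pair lemma
theorem pvCaseDouble (a m b : Char) (hg : pvMirror.get? a = some m)
    (h1 : pvSingle.contains a = false) (h2 : pvDouble.contains a = true)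
    (h3 : pvDouble.getD a ' ' = m) :
    (pvMirror.get? a == some b)
      = (if pvSingle.contains a then !(decide (a ≠ b))
         else if pvDouble.contains a then !(decide (b ≠ pvDouble.getD a ' '))
         else if pvDouble.contains b then !(decide (a ≠ pvDouble.getD b ' '))
         else false) := by
  rw [hg, if_neg (by rw [h1]; exact Bool.false_ne_true), if_pos h2, h3]
  by_cases hb : b = m
  · subst hb; simp
  · simp [hb, Ne.symm hb]

-- A's three-branch pair test equals B's single mirror-map lookup
theorem pv_pair_eq (a b : Char) :
    (pvMirror.get? a == some b)
      = (if pvSingle.contains a then !(decide (a ≠ b))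
         else if pvDouble.contains a then !(decide (b ≠ pvDouble.getD a ' '))
         else if pvDouble.contains b then !(decide (a ≠ pvDouble.getD b ' '))
         else false) := by
  have hnil : ∀ x : Char, (PySem.Dict.mk ([] : List (Char × Char))).get? x = none := fun _ => rfl
  by_cases hI : ('i' : Char) = a
  · subst hI; exact pvCaseSingle _ b (by decide) (by decide)
  by_cases hL : ('l' : Char) = a
  · subst hL; exact pvCaseSingle _ b (by decide) (by decide)
  by_cases hM : ('m' : Char) = a
  · subst hM; exact pvCaseSingle _ b (by decide) (by decide)
  by_cases hN : ('n' : Char) = a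
  · subst hN; exact pvCaseSingle _ b (by decide) (by decide)
  by_cases hO : ('o' : Char) = a
  · subst hO; exact pvCaseSingle _ b (by decide) (by decide)
  by_cases hT : ('t' : Char) = a
  · subst hT; exact pvCaseSingle _ b (by decide) (by decide)
  by_cases hU : ('u' : Char) = a
  · subst hU; exact pvCaseSingle _ b (by decide) (by decide)
  by_cases hV : ('v' : Char) = a
  · subst hV; exact pvCaseSingle _ b (by decide) (by decide)
  by_cases hW : ('w' : Char) = a
  · subst hW; exact pvCaseSingle _ b (by decide) (by decide)
  by_cases hX : ('x' : Char) = a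
  · subst hX; exact pvCaseSingle _ b (by decide) (by decide)
  by_cases hB : ('b' : Char) = a
  · subst hB; exact pvCaseDouble _ 'd' b (by decide) (by decide) (by decide) (by decide)
  by_cases hP : ('p' : Char) = a
  · subst hP; exact pvCaseDouble _ 'q' b (by decide) (by decide) (by decide) (by decide)
  by_cases hS : ('s' : Char) = a
  · subst hS; exact pvCaseDouble _ 'z' b (by decide) (by decide) (by decide) (by decide)
  by_cases hD : ('d' : Char) = a
  · subst hD
    rw [show pvMirror.get? 'd' = some 'b' from by decide, if_neg (by decide), if_neg (by decide)]
    by_cases k1 : ('b' : Char) = b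
    · subst k1; decide
    by_cases k2 : ('p' : Char) = b
    · subst k2; decide
    by_cases k3 : ('s' : Char) = b
    · subst k3; decide
    rw [if_neg (by simp [pvDouble_mk, PySem.Dict.contains_mk, k1, k2, k3])]
    simpa using k1
  by_cases hQ : ('q' : Char) = a
  · subst hQ
    rw [show pvMirror.get? 'q' = some 'p' from by decide, if_neg (by decide), if_neg (by decide)]
    by_cases k1 : ('b' : Char) = b
    · subst k1; decide
    by_cases k2 : ('p' : Char) = b
    · subst k2; decide
    by_cases k3 : ('s' : Char) = b
    · subst k3; decide
    rw [if_neg (by simp [pvDouble_mk, PySem.Dict.contains_mk, k1, k2, k3])]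
    simpa using k2
  by_cases hZ : ('z' : Char) = a
  · subst hZ
    rw [show pvMirror.get? 'z' = some 's' from by decide, if_neg (by decide), if_neg (by decide)]
    by_cases k1 : ('b' : Char) = b
    · subst k1; decide
    by_cases k2 : ('p' : Char) = b
    · subst k2; decide
    by_cases k3 : ('s' : Char) = b
    · subst k3; decide
    rw [if_neg (by simp [pvDouble_mk, PySem.Dict.contains_mk, k1, k2, k3])]
    simpa using k3
  have hg : pvMirror.get? a = none := by
    simp only [pvMirror_mk, PySem.Dict.get?_mk_cons, hnil, beq_iff_eq]
    simp [hI, hL, hM, hN, hO, hT, hU, hV, hW, hX, hB, hP, hS, hD, hQ, hZ]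
  have hs1 : pvSingle.contains a = false := by
    simp [pvSingle]
    exact ⟨fun h => hI h.symm, fun h => hL h.symm, fun h => hM h.symm, fun h => hN h.symm,
      fun h => hO h.symm, fun h => hT h.symm, fun h => hU h.symm, fun h => hV h.symm,
      fun h => hW h.symm, fun h => hX h.symm⟩
  have hd1 : pvDouble.contains a = false := by
    simp [pvDouble_mk, PySem.Dict.contains_mk, hB, hP, hS]
  rw [hg, if_neg (by rw [hs1]; exact Bool.false_ne_true), if_neg (by rw [hd1]; exact Bool.false_ne_true)]
  by_cases hcb : pvDouble.contains b
  · rw [if_pos hcb]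
    have hb3 : b = 'b' ∨ b = 'p' ∨ b = 's' := by
      rw [pvDouble_mk] at hcb
      simp [PySem.Dict.contains_mk] at hcb
      obtain h | h | h := hcb
      · exact Or.inl h.symm
      · exact Or.inr (Or.inl h.symm)
      · exact Or.inr (Or.inr h.symm)
    rcases hb3 with rfl | rfl | rfl
    · simp only [show pvDouble.getD 'b' ' ' = 'd' from by decide]
      simp
      exact fun h => hD h.symm
    · simp only [show pvDouble.getD 'p' ' ' = 'q' from by decide]
      simp
      exact fun h => hQ h.symm
    · simp only [show pvDouble.getD 's' ' ' = 'z' from by decide]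
      simp
      exact fun h => hZ h.symm
  · simp [hcb]

-- A's loop is the all-quantified mirror-pair test (one index at a time)
theorem pv_mirLoop_all (s : List Char) (l : List Int) (hl : ∀ i ∈ l, 0 ≤ i ∧ 2 * i < (s.length : Int)) :
    pvMirLoop s l
      = l.all (fun i => pvMirror.get? (PySem.List.pyGetD s i ' ')
          == some (PySem.List.pyGetD s ((s.length : Int) - 1 - i) ' ')) := by
  induction l with
  | nil => rfl
  | cons i rest ih =>
    have hi := hl i (by simp)
    have hneg : PySem.List.pyGetD s (-1 - i) ' ' = PySem.List.pyGetD s ((s.length : Int) - 1 - i) ' ' := by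
      obtain ⟨k, hk1, hk2⟩ : ∃ k : Nat, (-1 - i) = -(k : Int) ∧ 0 < k ∧ k ≤ s.length :=
        ⟨(1 + i).toNat, by omega, by omega, by omega⟩
      have h2 : ((s.length : Int) - 1 - i) = ((s.length - k : Nat) : Int) := by omega
      rw [hk1, h2]
      rw [PySem.List.pyGetD_neg_natCast s k ' ' hk2.1 hk2.2]
      rw [PySem.List.pyGetD_natCast]
      rw [List.getD_eq_getElem _ _ (by omega)]
    rw [List.all_cons, ← ih (fun j hj => hl j (by simp [hj]))]
    rw [show pvMirLoop s (i :: rest)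
        = ((if pvSingle.contains (PySem.List.pyGetD s i ' ') then !(decide (PySem.List.pyGetD s i ' ' ≠ PySem.List.pyGetD s (-1 - i) ' '))
           else if pvDouble.contains (PySem.List.pyGetD s i ' ') then !(decide (PySem.List.pyGetD s (-1 - i) ' ' ≠ pvDouble.getD (PySem.List.pyGetD s i ' ') ' '))
           else if pvDouble.contains (PySem.List.pyGetD s (-1 - i) ' ') then !(decide (PySem.List.pyGetD s i ' ' ≠ pvDouble.getD (PySem.List.pyGetD s (-1 - i) ' ') ' '))
           else false) && pvMirLoop s rest) from by
      simp only [pvMirLoop]; split_ifs <;> simp_all]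
    rw [hneg, ← pv_pair_eq]

-- on a single character, the mirror-map fixed-point test is exactly membership in 'single'
theorem pv_single_eq (a : Char) : (pvMirror.get? a == some a) = pvSingle.contains a := by
  rw [pv_pair_eq a a]
  split_ifs with h1 h2
  · simp only [ne_eq, not_true_eq_false, decide_false, Bool.not_false]
    exact h1.symm
  · have ha : a = 'b' ∨ a = 'p' ∨ a = 's' := by
      rw [pvDouble_mk] at h2
      simp [PySem.Dict.contains_mk] at h2
      tauto
    rcases ha with rfl | rfl | rfl <;> decide
  · simp_all

-- hence the two checkers agree on every string
theorem pv_checker_eq (s : List Char) : pvIsMirAlt s = pvIsMirrordrome s := by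
  unfold pvIsMirAlt pvIsMirrordrome
  by_cases h1 : s.length = 1
  · simp only [h1]
    norm_num
    rw [pv_single_eq, List.contains_eq_mem]
  · have hne : (s.length == 1) = false := by simp [h1]
    rw [hne]
    simp only [Bool.false_eq_true, if_false]
    rw [pv_mirLoop_all]
    intro i hi
    rw [PySem.List.mem_pyRange_one] at hi
    rw [PySem.Int.floordiv_eq_ediv_of_pos (by omega)] at hi
    omega

-- indicator of a mirrordrome substring
def pvInd (s : List Char) : Int := if pvIsMirrordrome s then 1 else 0

-- sum of the indicator over the nonempty prefixes of s
def pvPfx (s : List Char) : Int := ((List.range s.length).map (fun m => pvInd (s.take (m + 1)))).sum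

-- sum of the indicator over all nonempty contiguous substrings of s (by position)
def pvT : List Char → Int
  | [] => 0
  | a :: t => pvPfx (a :: t) + pvT t

theorem pvPfx_snoc (s : List Char) (h : s ≠ []) :
    pvPfx s = pvPfx s.dropLast + pvInd s := by
  have hn : 1 ≤ s.length := List.length_pos_iff.mpr h
  unfold pvPfx
  conv_lhs => rw [show s.length = (s.length - 1) + 1 by omega, List.range_succ]
  rw [List.map_append, List.sum_append, List.length_dropLast]
  have h1 : s.take (s.length - 1 + 1) = s := by
    rw [show s.length - 1 + 1 = s.length by omega, List.take_length]
  have h2 : ∀ m ∈ List.range (s.length - 1),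
      s.dropLast.take (m + 1) = s.take (m + 1) := by
    intro m hm
    rw [List.mem_range] at hm
    rw [List.dropLast_eq_take, List.take_take]
    congr 1
    omega
  have h3 : List.map (fun m => pvInd (s.take (m + 1))) (List.range (s.length - 1))
      = List.map (fun m => pvInd (s.dropLast.take (m + 1))) (List.range (s.length - 1)) :=
    List.map_congr_left (fun m hm => by rw [h2 m hm])
  rw [h3]
  simp [h1]

theorem pvT_rec (s : List Char) (h : s ≠ []) :
    pvT s = pvInd s + pvT s.tail + pvT s.dropLast - pvT s.tail.dropLast := by
  match s with
  | [a] =>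
    show pvPfx [a] + pvT [] = pvInd [a] + pvT [] + pvT [] - pvT []
    have : pvPfx [a] = pvInd [a] := by
      simp [pvPfx, List.range_succ]
    rw [this]; show pvInd [a] + 0 = pvInd [a] + 0 + 0 - 0; ring
  | a :: b :: t =>
    have hsnoc := pvPfx_snoc (a :: b :: t) (by simp)
    rw [List.dropLast_cons₂] at hsnoc
    show pvPfx (a :: b :: t) + pvT (b :: t)
        = pvInd (a :: b :: t) + pvT (b :: t) + pvT ((a :: b :: t).dropLast) - pvT ((b :: t).dropLast)
    rw [List.dropLast_cons₂]
    show pvPfx (a :: b :: t) + pvT (b :: t)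
        = pvInd (a :: b :: t) + pvT (b :: t)
          + (pvPfx (a :: (b :: t).dropLast) + pvT ((b :: t).dropLast)) - pvT ((b :: t).dropLast)
    rw [hsnoc]; ring

theorem pvA_fuel_eq_T (n : Nat) (s : List Char) (hs : s.length ≤ n) :
    recursiveMirrordromesFuel n s = pvT s := by
  induction n generalizing s with
  | zero =>
    have : s = [] := List.eq_nil_of_length_eq_zero (Nat.le_zero.mp hs)
    subst this
    rfl
  | succ n ih =>
    rcases eq_or_ne s [] with rfl | hnil
    · simp [recursiveMirrordromesFuel, pvT]
    · have hpos : 1 ≤ s.length := List.length_pos_iff.mpr hnil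
      rw [recursiveMirrordromesFuel]
      rw [if_neg (by exact_mod_cast Nat.not_lt.mpr hpos)]
      rw [pv_slice_tail, PySem.List.slice_to_neg_one, pv_slice_mid]
      rw [ih s.tail (by rw [List.length_tail]; omega),
          ih s.dropLast (by rw [List.length_dropLast]; omega),
          ih s.tail.dropLast (by rw [List.length_dropLast, List.length_tail]; omega)]
      rw [pvT_rec s hnil]
      simp only [pvInd]

theorem pvA_eq_T (s : List Char) : recursiveMirrordromesList s = pvT s :=
  pvA_fuel_eq_T s.length s le_rfl

theorem pvInner (s : List Char) (i : Nat) :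
    ((PySem.List.pyRange ((i : Int) + 1) ((s.length : Int) + 1) 1).map
      (fun j => pvInd (PySem.List.slice s (some (i : Int)) (some j)))).sum
      = pvPfx (s.drop i) := by
  rw [PySem.List.pyRange_one, List.map_map]
  have hcnt : (((s.length : Int) + 1) - ((i : Int) + 1)).toNat = s.length - i := by omega
  rw [hcnt, pvPfx, List.length_drop]
  apply congrArg List.sum
  apply List.map_congr_left
  intro k hk
  rw [List.mem_range] at hk
  show pvInd (PySem.List.slice s (some (i : Int)) (some ((i : Int) + 1 + (k : Int)))) = _
  rw [PySem.List.slice_toNat s (by omega) (by omega)]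
  congr 1
  have h1 : ((i : Int) + 1 + (k : Int)).toNat = i + 1 + k := by omega
  have h2 : ((i : Int)).toNat = i := by omega
  rw [h1, h2, show i + 1 + k - i = k + 1 by omega]

theorem pvSum_drop (s : List Char) :
    ((List.range s.length).map (fun k => pvPfx (s.drop k))).sum = pvT s := by
  induction s with
  | nil => simp [pvT, pvPfx]
  | cons a t ih =>
    rw [List.length_cons, List.range_succ_eq_map]
    simp only [List.map_cons, List.map_map, List.sum_cons, List.drop_zero,
      Function.comp_def, Nat.succ_eq_add_one, List.drop_succ_cons]
    rw [ih]
    rfl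

theorem pvB_eq_T (s : List Char) : recursiveMirrordromesAltList s = pvT s := by
  unfold recursiveMirrordromesAltList
  rw [← pvSum_drop s]
  rw [PySem.List.pyRange_zero_nat, List.map_map]
  apply congrArg List.sum
  apply List.map_congr_left
  intro k hk
  rw [List.mem_range] at hk
  show ((PySem.List.pyRange ((k : Int) + 1) ((s.length : Int) + 1) 1).countP
      (fun j => pvIsMirAlt (PySem.List.slice s (some (k : Int)) (some j))) : Int)
      = pvPfx (s.drop k)
  rw [← PySem.List.sum_map_ite_one_zero]
  rw [← pvInner s k]
  apply congrArg List.sum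
  apply List.map_congr_left
  intro j _
  simp [pvInd, pv_checker_eq]

theorem pvMain (s : List Char) : recursiveMirrordromesList s = recursiveMirrordromesAltList s := by
  rw [pvA_eq_T, pvB_eq_T]

-- ===== VERDICT (by name: the statement is the Claim_ definition above) =====
theorem recursiveMirrordromes_spec : Claim_equal_recursiveMirrordromes := by
  intro text _
  unfold Spec_recursiveMirrordromes recursiveMirrordromes recursiveMirrordromes_alt
  exact pvMain text.toList
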